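-- pv_equiv track=rewrite | github.com/Hetal2108/LocalRepo | Practical1.py | cnt_memb_bor
-- ===== SOURCE A (Python) =====
-- def cnt_memb_bor(lib_data):
--     num_members = len(next(iter(lib_data.values())))
--     member_cnt = 0
--
--     for i in range(num_members):
--         total_borrowed = 0
--         for book in lib_data:
--             total_borrowed += lib_data[book][i]
--
--         if total_borrowed == 0:
--             member_cnt += 1
--
--     return member_cnt
-- ===== SOURCE B (Python) =====
-- def cnt_memb_bor(lib_data):
--     rows = iter(lib_data.values())
--     totals = list(next(rows))
--     for row in rows:
--         totals = [t + x for t, x in zip(totals, row)]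
--     return sum(t == 0 for t in totals)
-- ===== Notes on version B (the rewrite author's own statement) =====
-- stated objective: alternative
-- what changed: B folds the value rows elementwise (zip-accumulating a totals vector row by row, then counting its zeros) instead of A's member-major double loop that re-sums a scalar per member with dict lookups.
import Mathlib
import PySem

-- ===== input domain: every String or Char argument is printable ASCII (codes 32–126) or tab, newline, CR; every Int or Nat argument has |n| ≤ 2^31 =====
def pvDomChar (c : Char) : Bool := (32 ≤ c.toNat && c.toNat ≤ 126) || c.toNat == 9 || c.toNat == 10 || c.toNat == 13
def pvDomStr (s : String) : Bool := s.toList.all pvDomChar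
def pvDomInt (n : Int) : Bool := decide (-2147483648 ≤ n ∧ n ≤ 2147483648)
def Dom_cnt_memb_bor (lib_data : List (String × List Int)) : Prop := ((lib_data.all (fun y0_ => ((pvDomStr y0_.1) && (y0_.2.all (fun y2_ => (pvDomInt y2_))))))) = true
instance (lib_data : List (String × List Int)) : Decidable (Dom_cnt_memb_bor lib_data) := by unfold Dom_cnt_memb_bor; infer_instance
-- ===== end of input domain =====

-- B zip-accumulates a totals vector over the value rows and counts its zeros, instead of
-- A's member-major double loop re-summing a scalar per member (objective: alternative).

-- ===== PORT A =====
-- dict lookup lib_data[book]: first match in the association list (total form; Pre_ keeps lookups meaningful)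
def pyLookup (lib_data : List (String × List Int)) (book : String) : List Int :=
  ((lib_data.find? (fun p => p.1 == book)).map (·.2)).getD []

def cnt_memb_bor (lib_data : List (String × List Int)) : Int :=
  let num_members : Int := PySem.List.len (lib_data.headD ("", [])).2
  (PySem.List.pyRange 0 num_members 1).foldl (fun member_cnt i =>
    let total_borrowed := lib_data.foldl (fun tb p =>
      tb + PySem.List.pyGetD (pyLookup lib_data p.1) i 0) 0
    if total_borrowed == 0 then member_cnt + 1 else member_cnt) 0

-- ===== PORT B =====
-- totals starts as a copy of the first row; each further row is zipped in elementwise;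
-- sum(t == 0 for t in totals) is the count of zero entries.
def cnt_memb_bor_alt (lib_data : List (String × List Int)) : Int :=
  match lib_data with
  | [] => 0  -- unreachable under Pre_: B's Python raises StopIteration here, like A
  | (_, first) :: rest =>
    let totals := rest.foldl (fun ts p => List.zipWith (· + ·) ts p.2) first
    (totals.countP (fun t => t == 0) : Int)

-- ===== PRECONDITION & SPEC =====
-- Pre_ excludes exactly: the empty dict (A raises StopIteration), dicts where a later book's
-- list is shorter than the first one (A raises IndexError), and association lists with
-- duplicate book keys — those represent no Python dict, and A's first-match lookup on them
-- is an artifact of the dict encoding.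
def Pre_cnt_memb_bor (lib_data : List (String × List Int)) : Prop :=
  lib_data ≠ [] ∧ (lib_data.map Prod.fst).Nodup ∧
    ∀ p ∈ lib_data, (lib_data.headD ("", [])).2.length ≤ p.2.length
instance (lib_data : List (String × List Int)) : Decidable (Pre_cnt_memb_bor lib_data) := by
  unfold Pre_cnt_memb_bor; infer_instance
def pvWitness_cnt_memb_bor : (List (String × List Int)) := [("a", [0, 1]), ("b", [0, -1])]

def Spec_cnt_memb_bor (lib_data : List (String × List Int)) (out : Int) : Prop := out = cnt_memb_bor_alt lib_data
instance (lib_data : List (String × List Int)) (out : Int) : Decidable (Spec_cnt_memb_bor lib_data out) := by unfold Spec_cnt_memb_bor; infer_instance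

-- ===== CLAIM (what is proved, stated in full; the proofs are below) =====
def Claim_equal_cnt_memb_bor : Prop := ∀ (lib_data : List (String × List Int)), Dom_cnt_memb_bor lib_data → Pre_cnt_memb_bor lib_data → Spec_cnt_memb_bor lib_data (cnt_memb_bor lib_data)

-- ===== LEMMAS AND PROOFS =====

-- with nodup keys, A's dict lookup on a stored key returns that entry's row
theorem lookup_self (lib_data : List (String × List Int))
    (hnd : (lib_data.map Prod.fst).Nodup) :
    ∀ p ∈ lib_data, pyLookup lib_data p.1 = p.2 := by
  intro p hp
  unfold pyLookup
  have hfind : lib_data.find? (fun q => q.1 == p.1) = some p := by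
    induction lib_data with
    | nil => cases hp
    | cons q L ih =>
        simp only [List.map_cons, List.nodup_cons, List.mem_map] at hnd
        cases hp with
        | head => simp
        | tail _ hmem =>
            have hne : (q.1 == p.1) = false := by
              simp only [beq_eq_false_iff_ne, ne_eq]
              intro h
              exact hnd.1 ⟨p, hmem, h.symm⟩
            simp [hne, ih hnd.2 hmem]
  rw [hfind]; rfl

-- zip-folding the rows yields the vector of per-index running sums
theorem foldzip (rest : List (String × List Int)) :
    ∀ (acc : List Int), (∀ p ∈ rest, acc.length ≤ p.2.length) →
      rest.foldl (fun ts p => List.zipWith (· + ·) ts p.2) acc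
        = (List.range acc.length).map
            (fun i => rest.foldl (fun s p => s + p.2.getD i 0) (acc.getD i 0)) := by
  induction rest with
  | nil =>
      intro acc _
      apply List.ext_getElem (by simp)
      intro i h1 h2
      simp only [List.length_map, List.length_range] at h2
      simp [List.getD_eq_getElem?_getD, List.getElem?_eq_getElem h2]
  | cons p rest ih =>
      intro acc hlen
      simp only [List.foldl_cons]
      have hle : acc.length ≤ p.2.length := hlen p (by simp)
      have hzlen : (List.zipWith (· + ·) acc p.2).length = acc.length := by
        simp [Nat.min_eq_left hle]
      rw [ih _ (fun q hq => by rw [hzlen]; exact hlen q (List.mem_cons_of_mem _ hq)), hzlen]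
      apply List.map_congr_left
      intro i hi
      rw [List.mem_range] at hi
      have hzg : (List.zipWith (· + ·) acc p.2).getD i 0 = acc.getD i 0 + p.2.getD i 0 := by
        rw [List.getD_eq_getElem?_getD, List.getElem?_eq_getElem (by omega),
            List.getElem_zipWith, List.getD_eq_getElem?_getD, List.getD_eq_getElem?_getD,
            List.getElem?_eq_getElem hi, List.getElem?_eq_getElem (by omega)]
        rfl
      rw [hzg]

theorem cnt_memb_bor_eq_alt (lib_data : List (String × List Int))
    (hpre : Pre_cnt_memb_bor lib_data) :
    cnt_memb_bor lib_data = cnt_memb_bor_alt lib_data := by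
  obtain ⟨hne, hnd, hlen⟩ := hpre
  obtain ⟨⟨k, first⟩, rest, rfl⟩ := List.exists_cons_of_ne_nil hne
  unfold cnt_memb_bor cnt_memb_bor_alt
  simp only [List.headD_cons, PySem.List.len_eq, PySem.List.pyRange_one, Int.sub_zero,
    Int.toNat_natCast, zero_add, List.foldl_map, PySem.List.pyGetD_natCast]
  rw [PySem.List.foldl_if_add_one, Int.zero_add]
  have hrows : ∀ p ∈ rest, first.length ≤ p.2.length := by
    intro p hp; exact hlen p (List.mem_cons_of_mem _ hp)
  rw [foldzip rest first hrows, List.countP_map]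
  congr 1
  apply List.countP_congr
  intro i hi
  rw [List.mem_range] at hi
  have hL : ∀ p ∈ (k, first) :: rest, pyLookup ((k, first) :: rest) p.1 = p.2 :=
    lookup_self _ hnd
  have hfold :
      ((k, first) :: rest).foldl
          (fun tb p => tb + (pyLookup ((k, first) :: rest) p.1).getD i 0) 0
        = rest.foldl (fun s p => s + p.2.getD i 0) (first.getD i 0) := by
    simp only [List.foldl_cons, hL (k, first) (by simp), Int.zero_add]
    exact PySem.List.foldl_congr_mem rest _ _ _
      (fun s p hp => by rw [hL p (List.mem_cons_of_mem _ hp)])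
  simp only [Function.comp, hfold]

-- ===== VERDICT (by name: the statement is the Claim_ definition above) =====
theorem cnt_memb_bor_spec : Claim_equal_cnt_memb_bor := by
  intro lib_data _ hpre
  unfold Spec_cnt_memb_bor
  exact cnt_memb_bor_eq_alt lib_data hpre
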